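-- pv_equiv track=rewrite | github.com/Neon717/Genshin-Speaker | src/textToSpeach.py | split_long_string
-- ===== SOURCE A (Python) =====
-- def split_long_string(input_string):
--     # Устанавливаем максимальную длину строки
--     max_length = 800
--     substrings = []
--     # Если длина строки меньше или равна максимальной, возвращаем ее в виде одного элемента списка
--     if len(input_string) <= max_length:
--         return [input_string]
--     start = 0
--     while start < len(input_string):
--         # Если оставшаяся часть строки меньше или равна 999 символам
--         if len(input_string) - start <= max_length:
--             substrings.append(input_string[start:])
--             break
--         # Находим индекс последнего знака в пределах 999 символов
--         end = start + max_length
--         last_punct_index = -1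
--         for i in range(end, start, -1):
--             if input_string[i-1] in ",.!?;":
--                 last_punct_index = i
--                 break
--         # Если знак не найден, то просто берем 999 символов
--         if last_punct_index == -1:
--             last_punct_index = end
--         substrings.append(input_string[start:last_punct_index])
--         start = last_punct_index
--     return substrings
-- ===== SOURCE B (Python) =====
-- import bisect
--
-- def split_long_string(input_string):
--     max_length = 800
--     if len(input_string) <= max_length:
--         return [input_string]
--     # one scan: every index holding a punctuation mark, ascending
--     puncts = [i for i, ch in enumerate(input_string) if ch in ",.!?;"]
--     substrings = []
--     start = 0
--     while start < len(input_string):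
--         if len(input_string) - start <= max_length:
--             substrings.append(input_string[start:])
--             break
--         end = start + max_length
--         idx = bisect.bisect_left(puncts, end)
--         if idx > 0 and puncts[idx - 1] >= start:
--             cut = puncts[idx - 1] + 1
--         else:
--             cut = end
--         substrings.append(input_string[start:cut])
--         start = cut
--     return substrings
-- ===== Notes on version B (the rewrite author's own statement) =====
-- stated objective: alternative
-- what changed: A rescans up to 800 characters backwards inside every chunk to find the last punctuation mark; B scans the string once to precompute the ascending list of all punctuation indices and locates each chunk's cut with a bisect_left binary search.
import Mathlib
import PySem

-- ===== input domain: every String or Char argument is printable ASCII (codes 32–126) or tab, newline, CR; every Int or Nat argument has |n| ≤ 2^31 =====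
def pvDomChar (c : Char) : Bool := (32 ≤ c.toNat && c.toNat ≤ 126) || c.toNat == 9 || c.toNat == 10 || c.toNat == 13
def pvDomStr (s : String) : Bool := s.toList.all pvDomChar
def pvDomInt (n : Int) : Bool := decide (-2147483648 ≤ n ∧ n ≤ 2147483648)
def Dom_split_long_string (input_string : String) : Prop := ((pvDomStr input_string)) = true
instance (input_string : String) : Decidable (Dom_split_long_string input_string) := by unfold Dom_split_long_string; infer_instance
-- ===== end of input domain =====

-- B replaces A's per-chunk backward scan for the last punctuation mark by one precomputed
-- ascending list of all punctuation indices plus a bisect_left binary search per chunk;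
-- the return values are proved equal on every input.

-- ===== PORT A =====

-- c in ",.!?;"  (membership of a single char in the punctuation string)
def pvIsPunct (c : Char) : Bool := c == ',' || c == '.' || c == '!' || c == '?' || c == ';'

-- 'for i in range(end, start, -1): if input_string[i-1] in ",.!?;": last_punct_index = i; break'
-- (first match while walking the range; -1 when the loop falls through)
def pvFindA (s : List Char) : List Int → Int
  | [] => -1
  | i :: rest => if pvIsPunct (PySem.List.pyGetD s (i - 1) ' ') then i else pvFindA s rest

-- needed by pvLoopA's decreasing_by: the scan returns -1 or an element of the range
theorem pvFindA_mem (s : List Char) (r : List Int) : pvFindA s r = -1 ∨ pvFindA s r ∈ r := by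
  induction r with
  | nil => left; rfl
  | cons i rest ih =>
    by_cases h : pvIsPunct (PySem.List.pyGetD s (i - 1) ' ') = true
    · right; simp [pvFindA, h]
    · rcases ih with h1 | h1 <;> simp only [pvFindA, h, if_false, Bool.false_eq_true] <;>
        [left; right] <;> simp [h1]

-- 'end = start + max_length; … ; if last_punct_index == -1: last_punct_index = end'
def pvCutA (s : List Char) (start : Int) : Int :=
  if pvFindA s (PySem.List.pyRange (start + 800) start (-1)) = -1 then start + 800
  else pvFindA s (PySem.List.pyRange (start + 800) start (-1))

-- needed by pvLoopA's decreasing_by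
theorem pvCutA_gt (s : List Char) (start : Int) : start < pvCutA s start := by
  unfold pvCutA
  split_ifs with h
  · omega
  · rcases pvFindA_mem s (PySem.List.pyRange (start + 800) start (-1)) with h1 | h1
    · exact absurd h1 h
    · exact (PySem.List.mem_pyRange_neg_one.1 h1).1

-- the 'while start < len(input_string):' loop of A
def pvLoopA (s : List Char) (start : Int) (acc : List String) : List String :=
  if _hlt : start < (s.length : Int) then
    if (s.length : Int) - start ≤ 800 then
      acc ++ [String.ofList (PySem.List.slice s (some start) none)]
    else
      pvLoopA s (pvCutA s start)
        (acc ++ [String.ofList (PySem.List.slice s (some start) (some (pvCutA s start)))])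
  else acc
termination_by ((s.length : Int) - start).toNat
decreasing_by
  have := pvCutA_gt s start
  omega

def split_long_string (input_string : String) : List String :=
  if PySem.Str.len input_string ≤ 800 then [input_string]
  else pvLoopA input_string.toList 0 []

-- ===== PORT B =====

-- 'puncts = [i for i, ch in enumerate(input_string) if ch in ",.!?;"]'
def pvPunctsOf (s : List Char) : List Int :=
  (PySem.List.enumerate s 0).filterMap (fun p => if pvIsPunct p.2 then some p.1 else none)

-- 'idx = bisect.bisect_left(puncts, end); cut = puncts[idx-1]+1 if idx > 0 and puncts[idx-1] >= start else end'
def pvCutB (puncts : List Int) (start : Int) : Int :=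
  if 0 < PySem.List.bisectLeft puncts (start + 800) ∧
      start ≤ PySem.List.pyGetD puncts ((PySem.List.bisectLeft puncts (start + 800) : Int) - 1) 0 then
    PySem.List.pyGetD puncts ((PySem.List.bisectLeft puncts (start + 800) : Int) - 1) 0 + 1
  else start + 800

-- needed by pvLoopB's decreasing_by
theorem pvCutB_gt (puncts : List Int) (start : Int) : start < pvCutB puncts start := by
  unfold pvCutB
  split_ifs with h
  · omega
  · omega

-- the 'while start < len(input_string):' loop of B
def pvLoopB (s : List Char) (puncts : List Int) (start : Int) (acc : List String) : List String :=
  if _hlt : start < (s.length : Int) then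
    if (s.length : Int) - start ≤ 800 then
      acc ++ [String.ofList (PySem.List.slice s (some start) none)]
    else
      pvLoopB s puncts (pvCutB puncts start)
        (acc ++ [String.ofList (PySem.List.slice s (some start) (some (pvCutB puncts start)))])
  else acc
termination_by ((s.length : Int) - start).toNat
decreasing_by
  have := pvCutB_gt puncts start
  omega

def split_long_string_alt (input_string : String) : List String :=
  if PySem.Str.len input_string ≤ 800 then [input_string]
  else pvLoopB input_string.toList (pvPunctsOf input_string.toList) 0 []

-- ===== PRECONDITION & SPEC =====
def Spec_split_long_string (input_string : String) (out : List String) : Prop := out = split_long_string_alt input_string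
instance (input_string : String) (out : List String) : Decidable (Spec_split_long_string input_string out) := by unfold Spec_split_long_string; infer_instance

-- ===== CLAIM (what is proved, stated in full; the proofs are below) =====
def Claim_equal_split_long_string : Prop := ∀ (input_string : String), Dom_split_long_string input_string → Spec_split_long_string input_string (split_long_string input_string)

-- ===== LEMMAS AND PROOFS =====

-- characterisation of A's backward scan over range(b, a, -1): either no index in (a, b]
-- has a punctuation mark at i-1, and the scan yields -1, or the scan yields the LARGEST such index.
theorem pvFindA_spec (s : List Char) (a b : Int) (hab : a ≤ b) :
    (pvFindA s (PySem.List.pyRange b a (-1)) = -1 ∧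
      ∀ i : Int, a < i → i ≤ b → pvIsPunct (PySem.List.pyGetD s (i - 1) ' ') = false) ∨
    (a < pvFindA s (PySem.List.pyRange b a (-1)) ∧ pvFindA s (PySem.List.pyRange b a (-1)) ≤ b ∧
      pvIsPunct (PySem.List.pyGetD s (pvFindA s (PySem.List.pyRange b a (-1)) - 1) ' ') = true ∧
      ∀ i : Int, pvFindA s (PySem.List.pyRange b a (-1)) < i → i ≤ b →
        pvIsPunct (PySem.List.pyGetD s (i - 1) ' ') = false) := by
  have hn : (b - a).toNat ≤ (b - a).toNat := le_rfl
  generalize hN : (b - a).toNat = N at hn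
  clear hn
  induction N generalizing b with
  | zero =>
    have hba : b ≤ a := by omega
    have hab' : a = b := le_antisymm hab hba
    left
    rw [PySem.List.pyRange_neg_one_eq_nil hba]
    exact ⟨rfl, fun i h1 h2 => absurd (lt_of_lt_of_le h1 h2) (by omega)⟩
  | succ N ih =>
    have hb : a < b := by omega
    rw [PySem.List.pyRange_neg_one_cons hb]
    by_cases hp : pvIsPunct (PySem.List.pyGetD s (b - 1) ' ') = true
    · right
      have he : pvFindA s (b :: PySem.List.pyRange (b - 1) a (-1)) = b := by
        simp [pvFindA, hp]
      rw [he]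
      exact ⟨hb, le_rfl, hp, fun i h1 h2 => absurd (lt_of_lt_of_le h1 h2) (lt_irrefl b)⟩
    · simp only [pvFindA, hp, if_false, Bool.false_eq_true]
      have hp' : pvIsPunct (PySem.List.pyGetD s (b - 1) ' ') = false := by
        revert hp; cases pvIsPunct (PySem.List.pyGetD s (b - 1) ' ') <;> simp
      rcases ih (b - 1) (by omega) (by omega) with ⟨h1, h2⟩ | ⟨h1, h2, h3, h4⟩
      · left
        refine ⟨h1, fun i hi1 hi2 => ?_⟩
        by_cases hib : i = b
        · subst hib; exact hp'
        · exact h2 i hi1 (by omega)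
      · right
        refine ⟨h1, by omega, h3, fun i hi1 hi2 => ?_⟩
        by_cases hib : i = b
        · subst hib; exact hp'
        · exact h4 i hi1 (by omega)

-- membership in the precomputed punctuation-index list
theorem mem_pvPunctsOf (s : List Char) (p : Int) :
    p ∈ pvPunctsOf s ↔ ∃ k : Nat, ∃ h : k < s.length, p = (k : Int) ∧ pvIsPunct s[k] = true := by
  unfold pvPunctsOf
  simp only [List.mem_filterMap, PySem.List.mem_enumerate_iff]
  constructor
  · rintro ⟨⟨i, c⟩, ⟨k, hk, heq⟩, hif⟩
    simp only [Prod.mk.injEq] at heq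
    split_ifs at hif with hp
    · simp only [Option.some_inj] at hif
      exact ⟨k, hk, by omega, by rw [← heq.2]; exact hp⟩
  · rintro ⟨k, hk, rfl, hp⟩
    exact ⟨((k : Int), s[k]), ⟨k, hk, by simp⟩, by simp [hp]⟩

-- the precomputed list is strictly increasing
theorem pairwise_pvPunctsOf (s : List Char) : (pvPunctsOf s).Pairwise (· < ·) := by
  unfold pvPunctsOf
  refine List.Pairwise.filterMap _ ?_ (PySem.List.pairwise_lt_enumerate s 0)
  rintro ⟨i, c⟩ ⟨j, d⟩ hlt b hb b' hb'
  split_ifs at hb hb' <;> simp_all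

-- the two cut positions agree on every full chunk
theorem cut_eq (s : List Char) (start : Int) (h0 : 0 ≤ start)
    (hlen : 800 < (s.length : Int) - start) :
    pvCutA s start = pvCutB (pvPunctsOf s) start := by
  set puncts := pvPunctsOf s with hpuncts
  set e : Int := start + 800 with he
  have hpw : puncts.Pairwise (· < ·) := by rw [hpuncts]; exact pairwise_pvPunctsOf s
  have hple : puncts.Pairwise (· ≤ ·) := hpw.imp le_of_lt
  obtain ⟨hb1, hb2, hb3⟩ := PySem.List.bisectLeft_spec puncts e hple
  set idx := PySem.List.bisectLeft puncts e with hidx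
  have mono : ∀ (i j : Nat) (_hij : i ≤ j) (hj : j < puncts.length), puncts[i]'(by omega) ≤ puncts[j] := by
    intro i j hij hj
    rcases Nat.lt_or_ge i j with h | h
    · exact le_of_lt (List.pairwise_iff_getElem.1 hpw i j (by omega) hj h)
    · have : i = j := by omega
      subst this; exact le_rfl
  have heltlen : e < (s.length : Int) := by omega
  rcases pvFindA_spec s start e (by omega) with ⟨hf1, hf2⟩ | ⟨hf1, hf2, hf3, hf4⟩
  · -- no punctuation in the window: both cuts are e
    rw [pvCutA, pvCutB]
    simp only [← he, ← hidx]
    rw [if_pos hf1, if_neg]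
    rintro ⟨hi0, hge⟩
    have hi1 : (idx : Int) - 1 < (puncts.length : Int) := by omega
    have hgel : PySem.List.pyGetD puncts ((idx : Int) - 1) 0 = puncts[((idx : Int) - 1).toNat]'(by omega) :=
      PySem.List.pyGetD_eq_getElem puncts 0 (by omega) hi1
    set g := PySem.List.pyGetD puncts ((idx : Int) - 1) 0 with hg
    have hglt : g < e := by
      rw [hgel]; exact hb2 _ (by omega) (by omega)
    have hmem : g ∈ puncts := by rw [hgel]; exact List.getElem_mem _
    rw [hpuncts, mem_pvPunctsOf] at hmem
    obtain ⟨k, hk, hgk, hpk⟩ := hmem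
    have hfalse := hf2 (g + 1) (by omega) (by omega)
    rw [show g + 1 - 1 = g from by omega,
        PySem.List.pyGetD_eq_getElem s ' ' (by omega) (by omega)] at hfalse
    have hkt : g.toNat = k := by omega
    simp only [hkt] at hfalse
    rw [hfalse] at hpk
    exact absurd hpk (by simp)
  · -- punctuation found: both cuts are f = (largest punct index in the window) + 1
    set f := pvFindA s (PySem.List.pyRange e start (-1)) with hf
    rw [pvCutA, pvCutB]
    simp only [← he, ← hidx, ← hf]
    rw [if_neg (by omega)]
    -- f - 1 is a member of puncts
    have hfm : f - 1 ∈ puncts := by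
      rw [hpuncts, mem_pvPunctsOf]
      refine ⟨(f - 1).toNat, by omega, by omega, ?_⟩
      rw [PySem.List.pyGetD_eq_getElem s ' ' (by omega) (by omega)] at hf3
      exact hf3
    obtain ⟨j, hj, hjval⟩ := List.mem_iff_getElem.1 hfm
    have hjlt : j < idx := by
      by_contra hcon
      have := hb3 j hj (by omega)
      omega
    have hi0 : 0 < idx := by omega
    have hi1 : (idx : Int) - 1 < (puncts.length : Int) := by omega
    have hgel : PySem.List.pyGetD puncts ((idx : Int) - 1) 0 = puncts[((idx : Int) - 1).toNat]'(by omega) :=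
      PySem.List.pyGetD_eq_getElem puncts 0 (by omega) hi1
    set g := PySem.List.pyGetD puncts ((idx : Int) - 1) 0 with hg
    have hfg : f - 1 ≤ g := by
      rw [hgel, ← hjval]
      exact mono j (((idx : Int) - 1).toNat) (by omega) (by omega)
    have hglt : g < e := by rw [hgel]; exact hb2 _ (by omega) (by omega)
    have hmem : g ∈ puncts := by rw [hgel]; exact List.getElem_mem _
    rw [hpuncts, mem_pvPunctsOf] at hmem
    obtain ⟨k, hk, hgk, hpk⟩ := hmem
    have hgf : g ≤ f - 1 := by
      by_contra hcon
      have hfalse := hf4 (g + 1) (by omega) (by omega)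
      rw [show g + 1 - 1 = g from by omega,
          PySem.List.pyGetD_eq_getElem s ' ' (by omega) (by omega)] at hfalse
      have hkt : g.toNat = k := by omega
      simp only [hkt] at hfalse
      rw [hfalse] at hpk
      exact absurd hpk (by simp)
    rw [if_pos ⟨hi0, by omega⟩]
    omega

-- the two while-loops agree
theorem loop_eq (s : List Char) (start : Int) (h0 : 0 ≤ start) (acc : List String) :
    pvLoopA s start acc = pvLoopB s (pvPunctsOf s) start acc := by
  rw [pvLoopA, pvLoopB]
  split_ifs with h1 h2
  · rfl
  · rw [cut_eq s start h0 (by omega)]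
    exact loop_eq s (pvCutB (pvPunctsOf s) start)
      (by have := pvCutB_gt (pvPunctsOf s) start; omega) _
  · rfl
termination_by ((s.length : Int) - start).toNat
decreasing_by
  have := pvCutB_gt (pvPunctsOf s) start
  omega

-- ===== VERDICT (by name: the statement is the Claim_ definition above) =====
theorem split_long_string_spec : Claim_equal_split_long_string := by
  intro s _
  unfold Spec_split_long_string split_long_string split_long_string_alt
  split_ifs with h
  · rfl
  · exact loop_eq s.toList 0 le_rfl []
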